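-- pv_equiv track=rewrite | github.com/GII/emdb_core | core/core/utils.py | separate_perceptions
-- ===== SOURCE A (Python) =====
-- def separate_perceptions(perception):
--     """
--     Separate a dicionary with several perceptions in several ones with one perception.
--
--     :param perception: The dictionary with all perceptions.
--     :type perception: dict
--     :return: A list with the dictionaries.
--     :rtype: list
--     """
--     perceptions = []
--     for i in range(max([len(sensor) for sensor in perception.values()])):
--             perception_line = {}
--             for sensor, value in perception.items():
--                 sid = i % len(value)
--                 perception_line[sensor + str(sid)] = value[sid]
--             perceptions.append(perception_line)
--
--     return perceptions
-- ===== SOURCE B (Python) =====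
-- def separate_perceptions(perception):
--     max_len = max([len(sensor) for sensor in perception.values()])
--     columns = [
--         [(sensor + str(i % len(value)), value[i % len(value)]) for i in range(max_len)]
--         for sensor, value in perception.items()
--     ]
--     return [dict(row) for row in zip(*columns)]
-- ===== Notes on version B (the rewrite author's own statement) =====
-- stated objective: alternative
-- what changed: Replaces A's row-major nested loop (one dict built per index by scanning all sensors) with a column-major construction: one full (key, value) column per sensor, then a zip-transpose into per-index dicts.
-- outside the precondition, e.g. on separate_perceptions({}): A raises ValueError, B raises ValueError; on separate_perceptions({'a': [], 'b': [1]}): A raises ZeroDivisionError, B raises ZeroDivisionError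
import Mathlib
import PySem

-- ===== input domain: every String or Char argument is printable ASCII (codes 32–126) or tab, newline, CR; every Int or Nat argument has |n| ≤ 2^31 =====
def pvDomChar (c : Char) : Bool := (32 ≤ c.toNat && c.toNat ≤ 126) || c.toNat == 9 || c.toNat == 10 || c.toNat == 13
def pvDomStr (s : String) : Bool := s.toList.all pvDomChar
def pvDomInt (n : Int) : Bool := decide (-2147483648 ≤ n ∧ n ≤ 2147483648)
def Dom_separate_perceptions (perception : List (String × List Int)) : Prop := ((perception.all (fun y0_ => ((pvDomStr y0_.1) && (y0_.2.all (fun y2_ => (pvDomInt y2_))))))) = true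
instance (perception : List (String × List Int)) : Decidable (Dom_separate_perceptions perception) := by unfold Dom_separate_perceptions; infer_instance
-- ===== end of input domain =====

-- B changes the decomposition: column-major (one (key,value) column per sensor, then a
-- zip-transpose into per-index dicts) instead of A's row-major nested loop; same cost.

-- ===== PORT A =====
-- row-major: for each index i, build the row dict by scanning all sensors
def separate_perceptions (perception : List (String × List Int)) : List (List (String × Int)) :=
  match PySem.List.max? (perception.map (fun sensor => (sensor.2.length : Int))) (fun x => x) with
  | none => []  -- Python: max([]) raises ValueError; excluded by Pre_
  | some maxLen =>
    (PySem.List.pyRange 0 maxLen 1).foldl (fun perceptions i =>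
      let line : PySem.Dict String Int :=
        perception.foldl (fun d sv =>
          let sid := PySem.Int.mod i (sv.2.length : Int)
          -- value[sid] is in range whenever it is reached under Pre_ (sid = i % len, len > 0)
          d.insert (sv.1 ++ PySem.Int.toStr sid) (PySem.List.pyGetD sv.2 sid 0))
          PySem.Dict.empty
      perceptions ++ [line.items]) []

-- ===== PORT B =====
-- one sensor's full column: [(sensor + str(i % len), value[i % len]) for i in range(maxLen)]
def pvColumn (maxLen : Int) (sv : String × List Int) : List (String × Int) :=
  (PySem.List.pyRange 0 maxLen 1).map (fun i =>
    let sid := PySem.Int.mod i (sv.2.length : Int)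
    (sv.1 ++ PySem.Int.toStr sid, PySem.List.pyGetD sv.2 sid 0))

-- zip(*columns): take the head of every column, recurse on the tails, stop at the shortest
def pvTranspose : List (List (String × Int)) → List (List (String × Int))
  | [] => []
  | c :: cs =>
    if h : c ≠ [] ∧ ∀ x ∈ cs, x ≠ [] then  -- h is used by decreasing_by
      ((c :: cs).map (fun x => x.headD ("", 0))) :: pvTranspose ((c :: cs).map List.tail)
    else []
termination_by cols => (cols.headD []).length
decreasing_by
  obtain ⟨h1, _⟩ := h
  cases c with
  | nil => exact absurd rfl h1
  | cons a t => simp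

def separate_perceptions_alt (perception : List (String × List Int)) : List (List (String × Int)) :=
  match PySem.List.max? (perception.map (fun sensor => (sensor.2.length : Int))) (fun x => x) with
  | none => []  -- Python: max([]) raises ValueError; excluded by Pre_
  | some maxLen =>
    let columns := perception.map (pvColumn maxLen)
    (pvTranspose columns).map (fun row => (PySem.Dict.ofList row).items)

-- ===== PRECONDITION & SPEC =====
-- Pre_ excludes exactly the inputs on which Python A raises: the empty dict (max([]) →
-- ValueError) and a dict mixing empty and non-empty sensor values (i % 0 → ZeroDivisionError).
def Pre_separate_perceptions (perception : List (String × List Int)) : Prop :=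
  perception ≠ [] ∧ ((∀ p ∈ perception, p.2 = []) ∨ (∀ p ∈ perception, p.2 ≠ []))
instance (perception : List (String × List Int)) : Decidable (Pre_separate_perceptions perception) := by unfold Pre_separate_perceptions; infer_instance
def pvWitness_separate_perceptions : (List (String × List Int)) := [("a", [1, 2]), ("b", [3])]

def Spec_separate_perceptions (perception : List (String × List Int)) (out : List (List (String × Int))) : Prop := out = separate_perceptions_alt perception
instance (perception : List (String × List Int)) (out : List (List (String × Int))) : Decidable (Spec_separate_perceptions perception out) := by unfold Spec_separate_perceptions; infer_instance

-- ===== CLAIM (what is proved, stated in full; the proofs are below) =====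
def Claim_equal_separate_perceptions : Prop := ∀ (perception : List (String × List Int)), Dom_separate_perceptions perception → Pre_separate_perceptions perception → Spec_separate_perceptions perception (separate_perceptions perception)

-- ===== LEMMAS AND PROOFS =====

-- transposing a nonempty list of equal-shape columns yields the rows, index by index
lemma pvTranspose_map {α : Type} (f : α → Int → String × Int) (p : List α) (hp : p ≠ [])
    (L : List Int) :
    pvTranspose (p.map (fun sv => L.map (f sv))) = L.map (fun i => p.map (fun sv => f sv i)) := by
  induction L with
  | nil =>
    cases p with
    | nil => exact absurd rfl hp
    | cons q qs => simp [pvTranspose]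
  | cons i L' ih =>
    cases p with
    | nil => exact absurd rfl hp
    | cons q qs =>
      rw [show ((q :: qs).map (fun sv => (i :: L').map (f sv))) =
            ((i :: L').map (f q)) :: qs.map (fun sv => (i :: L').map (f sv)) from rfl]
      rw [pvTranspose]
      rw [dif_pos (by constructor <;> simp)]
      have ht : (((i :: L').map (f q)) :: qs.map (fun sv => (i :: L').map (f sv))).map List.tail
          = (q :: qs).map (fun sv => L'.map (f sv)) := by
        simp [List.map_map, Function.comp]
      have hh : (((i :: L').map (f q)) :: qs.map (fun sv => (i :: L').map (f sv))).map
            (fun x => x.headD ("", 0))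
          = (q :: qs).map (fun sv => f sv i) := by
        simp [List.map_map, Function.comp]
      rw [ht, hh, ih]
      simp

-- ===== VERDICT (by name: the statement is the Claim_ definition above) =====
theorem separate_perceptions_spec : Claim_equal_separate_perceptions := by
  intro p _ _
  unfold Spec_separate_perceptions separate_perceptions separate_perceptions_alt
  cases hm : PySem.List.max? (p.map (fun sensor => (sensor.2.length : Int))) (fun x => x) with
  | none => rfl
  | some m =>
    have hp : p ≠ [] := by
      intro h
      subst h
      rw [show ((List.map (fun sensor => ((sensor.2.length : Int))) ([] : List (String × List Int)))) = ([] : List Int) from rfl,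
        (PySem.List.max?_eq_none_iff ([] : List Int) (fun x => x)).mpr rfl] at hm
      cases hm
    simp only []
    rw [PySem.List.foldl_append_singleton_eq_map
      (fun i => (p.foldl (fun d sv =>
          d.insert (sv.1 ++ PySem.Int.toStr (PySem.Int.mod i (sv.2.length : Int)))
            (PySem.List.pyGetD sv.2 (PySem.Int.mod i (sv.2.length : Int)) 0))
          PySem.Dict.empty).items)]
    rw [show p.map (pvColumn m) = p.map (fun sv => (PySem.List.pyRange 0 m 1).map
        (fun i => (sv.1 ++ PySem.Int.toStr (PySem.Int.mod i (sv.2.length : Int)),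
          PySem.List.pyGetD sv.2 (PySem.Int.mod i (sv.2.length : Int)) 0))) from rfl]
    rw [pvTranspose_map _ p hp]
    rw [List.map_map]
    refine List.map_congr_left (fun i _ => ?_)
    simp only [Function.comp, PySem.Dict.ofList, PySem.Dict.update, List.foldl_map]
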